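-- pv_equiv track=rewrite | github.com/Janek21/Bioinfo_share_2Y_2T | Laia/ASAB/W3/scoring_alignments/score_seqs.py | score_seqs
-- ===== SOURCE A (Python) =====
-- def score_seqs(seq1, seq2, match, mismatch):
--     '''
--     >>> score_seqs("THEFASTCAT", "THEFASTCAT", 1, -1)
--     10
--     >>> score_seqs("THEFASTCAT", "THELASTCAT", 1, -1)
--     8
--     >>> score_seqs("THEFASTCAT", "THELASTRAT", 1, -1)
--     6
--     >>> score_seqs("THEFASTCAT", "THE", 1, -1)
--     0
--     '''
--
--     score = 0
--     if len(seq1) != len(seq2):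
--         return 0
--
--     for i in range(len(seq1)):
--         if seq1[i] == seq2[i]:
--             score += match
--         else:
--             score += mismatch
--     return score
-- ===== SOURCE B (Python) =====
-- def score_seqs(seq1, seq2, match, mismatch):
--     if len(seq1) != len(seq2):
--         return 0
--     matches = len(set(enumerate(seq1)) & set(enumerate(seq2)))
--     return matches * match + (len(seq1) - matches) * mismatch
-- ===== Notes on version B (the rewrite author's own statement) =====
-- stated objective: alternative
-- what changed: Instead of scanning positions and branching per character, B builds the sets of (index, char) pairs of each sequence, takes their set intersection to obtain the number of matching positions, and computes the score by the closed formula matches*match + (len-matches)*mismatch.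
import Mathlib
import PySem

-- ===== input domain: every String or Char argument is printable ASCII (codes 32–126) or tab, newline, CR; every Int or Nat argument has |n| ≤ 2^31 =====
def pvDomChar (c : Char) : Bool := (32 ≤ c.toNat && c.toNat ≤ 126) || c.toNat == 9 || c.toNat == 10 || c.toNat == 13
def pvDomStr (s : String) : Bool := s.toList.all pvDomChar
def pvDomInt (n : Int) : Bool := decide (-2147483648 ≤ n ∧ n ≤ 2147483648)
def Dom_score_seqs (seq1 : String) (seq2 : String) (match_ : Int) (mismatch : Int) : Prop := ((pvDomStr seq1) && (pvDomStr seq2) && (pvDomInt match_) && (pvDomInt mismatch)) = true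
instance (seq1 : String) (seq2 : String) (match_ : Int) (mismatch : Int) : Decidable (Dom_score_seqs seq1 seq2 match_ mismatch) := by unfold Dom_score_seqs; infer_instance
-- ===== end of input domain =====

-- B replaces A's per-position branch-and-accumulate loop by intersecting the sets of (index, char)
-- pairs of the two sequences and applying a closed formula (alternative algorithm, same cost).

-- ===== PORT A =====
-- index loop adding match_ or mismatch per position (all indices are in range, so getD is exact for Python's seq[i])
def score_seqs (seq1 : String) (seq2 : String) (match_ : Int) (mismatch : Int) : Int :=
  if seq1.toList.length ≠ seq2.toList.length then 0
  else
    (List.range seq1.toList.length).foldl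
      (fun score i =>
        if seq1.toList.getD i ' ' == seq2.toList.getD i ' ' then score + match_
        else score + mismatch) 0

-- ===== PORT B =====
-- len(set(enumerate(seq1)) & set(enumerate(seq2))), then the closed formula
def score_seqs_alt (seq1 : String) (seq2 : String) (match_ : Int) (mismatch : Int) : Int :=
  if seq1.toList.length ≠ seq2.toList.length then 0
  else
    let cnt : Int := PySem.Set.len
      (PySem.Set.inter (PySem.Set.ofList (PySem.List.enumerate seq1.toList 0))
                       (PySem.Set.ofList (PySem.List.enumerate seq2.toList 0)))
    cnt * match_ + ((seq1.toList.length : Int) - cnt) * mismatch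

-- ===== PRECONDITION & SPEC =====
def Spec_score_seqs (seq1 : String) (seq2 : String) (match_ : Int) (mismatch : Int) (out : Int) : Prop := out = score_seqs_alt seq1 seq2 match_ mismatch
instance (seq1 : String) (seq2 : String) (match_ : Int) (mismatch : Int) (out : Int) : Decidable (Spec_score_seqs seq1 seq2 match_ mismatch out) := by unfold Spec_score_seqs; infer_instance

-- ===== CLAIM (what is proved, stated in full; the proofs are below) =====
def Claim_equal_score_seqs : Prop := ∀ (seq1 : String) (seq2 : String) (match_ : Int) (mismatch : Int), Dom_score_seqs seq1 seq2 match_ mismatch → Spec_score_seqs seq1 seq2 match_ mismatch (score_seqs seq1 seq2 match_ mismatch)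

-- ===== LEMMAS AND PROOFS =====

-- enumerate lists have no duplicates (first components strictly increase)
theorem nodup_enumerate {α : Type} (xs : List α) (s : Int) :
    (PySem.List.enumerate xs s).Nodup :=
  (PySem.List.pairwise_lt_enumerate xs s).imp (fun h => by
    intro he; rw [he] at h; exact lt_irrefl _ h)

-- the intersection of the two enumerate lists counts exactly the matching aligned positions
theorem inter_enum (a : List Char) : ∀ (b : List Char) (s : Int),
    ((PySem.List.enumerate a s).filter
        (fun p => (PySem.List.enumerate b s).contains p)).length
      = (a.zip b).countP (fun p => p.1 == p.2) := by
  induction a with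
  | nil => intro b s; simp
  | cons x a' ih =>
    intro b s
    cases b with
    | nil => simp
    | cons y b' =>
      rw [PySem.List.enumerate_cons, PySem.List.enumerate_cons]
      rw [List.filter_cons]
      have hhead : ((s, y) :: PySem.List.enumerate b' (s + 1)).contains (s, x) = (x == y) := by
        simp only [List.contains_cons]
        have hnm : ((PySem.List.enumerate b' (s + 1)).contains (s, x)) = false := by
          rw [Bool.eq_false_iff]
          intro hc
          have hm : ((s : Int), x) ∈ PySem.List.enumerate b' (s + 1) :=
            List.contains_iff_mem.mp hc
          rw [PySem.List.mem_enumerate_iff] at hm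
          obtain ⟨k, hk, hp⟩ := hm
          have : s = s + 1 + (k : Int) := congrArg Prod.fst hp
          omega
        rw [hnm, Bool.or_false]
        by_cases hxy : x = y
        · subst hxy; simp
        · have h1 : (((s, x) : Int × Char) == (s, y)) = false := by
            simp [hxy]
          have h2 : (x == y) = false := by simp [hxy]
          rw [h1, h2]
      have htail : (PySem.List.enumerate a' (s + 1)).filter
            (fun p => ((s, y) :: PySem.List.enumerate b' (s + 1)).contains p)
          = (PySem.List.enumerate a' (s + 1)).filter
            (fun p => (PySem.List.enumerate b' (s + 1)).contains p) := by
        apply List.filter_congr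
        intro p hp
        rw [PySem.List.mem_enumerate_iff] at hp
        obtain ⟨k, hk, hpe⟩ := hp
        simp only [List.contains_cons]
        have hne : (p == ((s, y) : Int × Char)) = false := by
          rw [beq_eq_false_iff_ne]
          intro he
          have : p.1 = s := by rw [he]
          rw [hpe] at this
          simp at this
          omega
        rw [hne, Bool.false_or]
      rw [htail, hhead]
      by_cases hxy : (x == y) = true
      · rw [if_pos hxy, List.zip_cons_cons]
        simp only [List.length_cons, List.countP_cons, hxy, if_true]
        rw [ih b' (s + 1)]
      · rw [if_neg hxy, List.zip_cons_cons]
        simp only [List.countP_cons]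
        rw [if_neg hxy, add_zero, ih b' (s + 1)]

-- A's index loop on equal-length lists equals count-of-matches times match_ plus rest times mismatch
theorem key_lemma (a b : List Char) (m mm init : Int) (h : a.length = b.length) :
    (List.range a.length).foldl
      (fun score i => if a.getD i ' ' == b.getD i ' ' then score + m else score + mm) init
    = init + ((a.zip b).countP (fun p => p.1 == p.2) : Int) * m
        + ((a.length : Int) - ((a.zip b).countP (fun p => p.1 == p.2) : Int)) * mm := by
  induction a generalizing b init with
  | nil =>
    cases b with
    | nil => simp
    | cons y b' => simp at h
  | cons x a' ih =>
    cases b with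
    | nil => simp at h
    | cons y b' =>
      simp only [List.length_cons] at h ⊢
      rw [List.range_succ_eq_map]
      simp only [List.foldl_cons, List.foldl_map]
      have h' : a'.length = b'.length := by omega
      have := ih b' (if (x == y) then init + m else init + mm) h'
      simp only [List.getD_cons_succ, List.getD_cons_zero] at this ⊢
      rw [this]
      by_cases hxy : (x == y) = true
      · simp only [hxy, List.zip_cons_cons, List.countP_cons]
        push_cast
        ring
      · simp only [hxy, List.zip_cons_cons, List.countP_cons]
        simp only [Bool.false_eq_true, if_false]
        push_cast
        ring

-- ===== VERDICT (by name: the statement is the Claim_ definition above) =====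
theorem score_seqs_spec : Claim_equal_score_seqs := by
  intro seq1 seq2 m mm _
  unfold Spec_score_seqs score_seqs score_seqs_alt
  by_cases h : seq1.toList.length = seq2.toList.length
  · simp only [h, ne_eq, not_true_eq_false, if_false]
    rw [← h, key_lemma _ _ _ _ _ h]
    have hset : PySem.Set.len
        (PySem.Set.inter (PySem.Set.ofList (PySem.List.enumerate seq1.toList 0))
                         (PySem.Set.ofList (PySem.List.enumerate seq2.toList 0)))
        = ((seq1.toList.zip seq2.toList).countP (fun p => p.1 == p.2) : Int) := by
      rw [PySem.Set.ofList_eq_self_of_nodup _ (nodup_enumerate _ _),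
          PySem.Set.ofList_eq_self_of_nodup _ (nodup_enumerate _ _)]
      unfold PySem.Set.inter PySem.Set.len
      simp only [PySem.Set.contains_eq_listContains]
      rw [inter_enum seq1.toList seq2.toList 0]
    rw [hset]
    ring
  · simp only [ne_eq, h, not_false_eq_true, if_true]
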